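-- pv_equiv track=rewrite | github.com/sshyran/Chromite-fresh-Dec-2022-source-import | ide_tooling/scripts/detect_indent.py | diff_histogram
-- ===== SOURCE A (Python) =====
-- from typing import Dict, List, Optional
--
-- def diff_histogram(text: str) -> Dict[int, int]:
--     """Split the input text into lines and calculate indentation freqeuency.
--
--     The result is a dictionary from indentation length (in spaces)
--     to number of occurencess in the input.
--     """
--     histogram = {}
--     prev_indent = None
--     for line in text.splitlines():
--         if not line:
--             continue
--         indent = len(line) - len(line.lstrip(" "))
--         if prev_indent is not None:
--             diff = indent - prev_indent
--             # Consider only the line pairs which increase indentation.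
--             if diff > 0:
--                 if diff in histogram:
--                     histogram[diff] += 1
--                 else:
--                     histogram[diff] = 1
--         prev_indent = indent
--     return histogram
-- ===== SOURCE B (Python) =====
-- def _indent(line):
--     return len(line) - len(line.lstrip(" "))
--
--
-- def _pos_diffs(indents):
--     """Recursively extract the positive differences of adjacent elements."""
--     if len(indents) < 2:
--         return []
--     d = indents[1] - indents[0]
--     rest = _pos_diffs(indents[1:])
--     return [d] + rest if d > 0 else rest
--
--
-- def diff_histogram(text: str):
--     """Recursive pairwise-difference extraction, then a count-per-distinct-value
--     dict comprehension (no incremental dict updates)."""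
--     diffs = _pos_diffs([_indent(l) for l in text.splitlines() if l])
--     return {d: diffs.count(d) for d in dict.fromkeys(diffs)}
-- ===== Notes on version B (the rewrite author's own statement) =====
-- stated objective: alternative
-- what changed: A streams once over the lines updating a histogram dict in place; B first extracts the positive adjacent differences by structural recursion on the indent list and then builds the dict by counting each distinct value with diffs.count (dedup + count-per-key instead of incremental tallying).
import Mathlib
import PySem

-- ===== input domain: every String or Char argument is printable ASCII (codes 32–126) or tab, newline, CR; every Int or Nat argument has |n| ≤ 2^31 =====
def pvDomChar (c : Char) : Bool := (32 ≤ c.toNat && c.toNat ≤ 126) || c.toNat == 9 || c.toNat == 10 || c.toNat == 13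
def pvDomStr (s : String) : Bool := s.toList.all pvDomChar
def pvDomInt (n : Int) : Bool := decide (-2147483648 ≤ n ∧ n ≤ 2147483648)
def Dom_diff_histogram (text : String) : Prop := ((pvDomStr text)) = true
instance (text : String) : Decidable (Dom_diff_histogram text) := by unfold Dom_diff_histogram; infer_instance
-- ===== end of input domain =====

-- B replaces A's streaming pass with in-place dict tallying by a recursive
-- pairwise-difference extraction followed by a count-per-distinct-value dict
-- comprehension (alternative decomposition, same behaviour).

-- ===== PORT A =====
-- len(line) - len(line.lstrip(" ")): lstrip(" ") ported by hand as dropWhile (· == ' ') —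
-- exact, since lstrip with the explicit chars " " removes exactly the leading space characters.
def pvIndent (line : String) : Int :=
  (line.toList.length : Int) - ((line.toList.dropWhile (· == ' ')).length : Int)

def diff_histogram (text : String) : List (Int × Int) :=
  (((PySem.Str.splitlines text).foldl
      (fun (st : PySem.Dict Int Int × Option Int) line =>
        if line = "" then st
        else
          let indent := pvIndent line
          let hist :=
            match st.2 with
            | none => st.1
            | some prev =>
              let diff := indent - prev
              if diff > 0 then
                if st.1.contains diff then st.1.insert diff (st.1.getD diff 0 + 1)
                else st.1.insert diff 1
              else st.1
          (hist, some indent))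
      (PySem.Dict.empty, none)).1).items

-- ===== PORT B =====
-- _pos_diffs: structural recursion on the indent list
def pvPosDiffs : List Int → List Int
  | [] => []
  | [_] => []
  | a :: b :: rest =>
    let d := b - a
    if d > 0 then d :: pvPosDiffs (b :: rest) else pvPosDiffs (b :: rest)

-- {d: diffs.count(d) for d in dict.fromkeys(diffs)}: dict.fromkeys = PySem.List.dedup
def diff_histogram_alt (text : String) : List (Int × Int) :=
  let diffs := pvPosDiffs (((PySem.Str.splitlines text).filter (fun l => l ≠ "")).map pvIndent)
  (PySem.List.dedup diffs).map (fun d => (d, (diffs.count d : Int)))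

-- ===== PRECONDITION & SPEC =====
def Spec_diff_histogram (text : String) (out : List (Int × Int)) : Prop := out = diff_histogram_alt text
instance (text : String) (out : List (Int × Int)) : Decidable (Spec_diff_histogram text out) := by unfold Spec_diff_histogram; infer_instance

-- ===== CLAIM =====
def Claim_equal_diff_histogram : Prop := ∀ (text : String), Dom_diff_histogram text → Spec_diff_histogram text (diff_histogram text)

-- ===== LEMMAS AND PROOFS =====

-- the one-step histogram update of A
def pvBump (h : PySem.Dict Int Int) (d : Int) : PySem.Dict Int Int :=
  h.insert d (h.getD d 0 + 1)

-- A's loop body, named for the proofs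
def pvStepA (st : PySem.Dict Int Int × Option Int) (line : String) :
    PySem.Dict Int Int × Option Int :=
  if line = "" then st
  else
    let indent := pvIndent line
    let hist :=
      match st.2 with
      | none => st.1
      | some prev =>
        let diff := indent - prev
        if diff > 0 then
          if st.1.contains diff then st.1.insert diff (st.1.getD diff 0 + 1)
          else st.1.insert diff 1
        else st.1
    (hist, some indent)

-- the same state machine on indent values
def pvStepG (st : PySem.Dict Int Int × Option Int) (i : Int) :
    PySem.Dict Int Int × Option Int :=
  (match st.2 with
   | none => st.1
   | some prev => if i - prev > 0 then pvBump st.1 (i - prev) else st.1,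
   some i)

-- positive consecutive diffs of p :: xs
def pvDiffs (p : Int) : List Int → List Int
  | [] => []
  | i :: rest => (if i - p > 0 then [i - p] else []) ++ pvDiffs i rest

lemma pvBump_eq_branch (h : PySem.Dict Int Int) (d : Int) :
    (if h.contains d then h.insert d (h.getD d 0 + 1) else h.insert d 1) = pvBump h d := by
  unfold pvBump
  by_cases hc : h.contains d
  · simp [hc]
  · have hn : h.get? d = none :=
      (PySem.Dict.get?_eq_none_iff_contains h d).2 (by simp [hc])
    have hg : h.getD d 0 = 0 := by
      show (h.get? d).getD 0 = 0
      rw [hn]; rfl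
    simp [hc, hg]

lemma pvStepA_eq (st : PySem.Dict Int Int × Option Int) (l : String) (hl : l ≠ "") :
    pvStepA st l = pvStepG st (pvIndent l) := by
  unfold pvStepA pvStepG
  rw [if_neg hl]
  rcases st with ⟨h, prev⟩
  cases prev with
  | none => rfl
  | some p =>
    simp only
    by_cases hpos : pvIndent l - p > 0
    · rw [if_pos hpos, if_pos hpos, pvBump_eq_branch]
    · rw [if_neg hpos, if_neg hpos]

-- A's line fold = the indent-value fold over the non-empty lines
lemma pvFoldLines (ls : List String) : ∀ (st : PySem.Dict Int Int × Option Int),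
    ls.foldl pvStepA st
      = ((ls.filter (fun l => l ≠ "")).map pvIndent).foldl pvStepG st := by
  induction ls with
  | nil => intro st; rfl
  | cons l rest ih =>
    intro st
    by_cases hl : l = ""
    · subst hl
      rw [List.foldl_cons, show pvStepA st "" = st from rfl]
      simp [ih]
    · simp only [List.foldl_cons, List.filter_cons]
      rw [pvStepA_eq st l hl, ih]
      simp [hl]

-- the indent-value fold with a known previous indent tallies pvDiffs
lemma pvFoldG (xs : List Int) : ∀ (h : PySem.Dict Int Int) (p : Int),
    (xs.foldl pvStepG (h, some p)).1 = (pvDiffs p xs).foldl pvBump h := by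
  induction xs with
  | nil => intro h p; rfl
  | cons i rest ih =>
    intro h p
    simp only [List.foldl_cons, pvDiffs, List.foldl_append]
    by_cases hpos : i - p > 0
    · have : pvStepG (h, some p) i = (pvBump h (i - p), some i) := by
        simp only [pvStepG]; rw [if_pos hpos]
      rw [this, ih, if_pos hpos]
      rfl
    · have : pvStepG (h, some p) i = (h, some i) := by
        simp only [pvStepG]; rw [if_neg hpos]
      rw [this, ih, if_neg hpos]
      rfl

-- B's recursive extraction agrees with pvDiffs
lemma pvPosDiffs_eq (xs : List Int) : ∀ (p : Int),
    pvPosDiffs (p :: xs) = pvDiffs p xs := by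
  induction xs with
  | nil => intro p; rfl
  | cons i rest ih =>
    intro p
    simp only [pvPosDiffs, pvDiffs]
    by_cases hpos : i - p > 0
    · rw [if_pos hpos, ih, if_pos hpos]; rfl
    · rw [if_neg hpos, ih, if_neg hpos]; rfl

theorem pv_main (text : String) : diff_histogram text = diff_histogram_alt text := by
  have hA : diff_histogram text
      = (((PySem.Str.splitlines text).foldl pvStepA (PySem.Dict.empty, none)).1).items := rfl
  rw [hA, pvFoldLines]
  show _ = (let diffs := pvPosDiffs (((PySem.Str.splitlines text).filter (fun l => l ≠ "")).map pvIndent);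
    (PySem.List.dedup diffs).map (fun d => (d, (diffs.count d : Int))))
  cases hind : ((PySem.Str.splitlines text).filter (fun l => l ≠ "")).map pvIndent with
  | nil => rfl
  | cons i rest =>
    simp only [List.foldl_cons]
    have h0 : pvStepG (PySem.Dict.empty, none) i = (PySem.Dict.empty, some i) := rfl
    rw [h0, pvFoldG]
    have hbump : (pvDiffs i rest).foldl pvBump PySem.Dict.empty
        = PySem.Dict.counter (pvDiffs i rest) :=
      PySem.Dict.foldl_insert_getD_add_one_eq_counter (pvDiffs i rest)
    rw [hbump, PySem.Dict.items_counter, pvPosDiffs_eq]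
    simp [PySem.List.dedup_eq_ofList]

-- ===== VERDICT =====
theorem diff_histogram_spec : Claim_equal_diff_histogram := by
  intro text _
  exact pv_main text
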